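-- pv_equiv track=rewrite | github.com/loaclhostjason/auto_ | console/app/main/models.py | _get_bitwidth
-- ===== SOURCE A (Python) =====
-- def _get_bitwidth(start_bit, ext_bit, len_bit):
--     bitwidth = []
--     index = 0
--     while len_bit > 0:
--         '''if len_bit + start_bit >= 8:
--             bitwidth.append(8 - start_bit)
--         else:
--             bitwidth.append(len_bit - start_bit)'''
--         if index == 0:
--             if len_bit + start_bit < 8:
--                 bitwidth.append(len_bit)
--             else:
--                 bitwidth.append(8 - start_bit)
--         else:
--             if ext_bit >= 8:
--                 bitwidth.append(0)
--                 len_bit = 0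
--             else:
--                 if len_bit > 8 - ext_bit:
--                     bitwidth.append(8 - ext_bit)
--                 else:
--                     bitwidth.append(len_bit)
--         len_bit = len_bit - bitwidth[index]
--         #start_bit = 0
--         index = index + 1
--     return bitwidth
-- ===== SOURCE B (Python) =====
-- def _get_bitwidth(start_bit, ext_bit, len_bit):
--     if len_bit <= 0:
--         return []
--     first = len_bit if len_bit + start_bit < 8 else 8 - start_bit
--     remaining = len_bit - first
--     if remaining == 0:
--         return [first]
--     if ext_bit >= 8:
--         return [first, 0]
--     step = 8 - ext_bit
--     q, r = divmod(remaining, step)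
--     return [first] + [step] * q + ([r] if r else [])
-- ===== Notes on version B (the rewrite author's own statement) =====
-- stated objective: simpler
-- what changed: Replaces the index-guarded while loop with a closed-form arithmetic split: the first chunk by one comparison, then divmod(remaining, 8-ext_bit) builds the tail as a replicated list plus optional remainder.
import Mathlib
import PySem

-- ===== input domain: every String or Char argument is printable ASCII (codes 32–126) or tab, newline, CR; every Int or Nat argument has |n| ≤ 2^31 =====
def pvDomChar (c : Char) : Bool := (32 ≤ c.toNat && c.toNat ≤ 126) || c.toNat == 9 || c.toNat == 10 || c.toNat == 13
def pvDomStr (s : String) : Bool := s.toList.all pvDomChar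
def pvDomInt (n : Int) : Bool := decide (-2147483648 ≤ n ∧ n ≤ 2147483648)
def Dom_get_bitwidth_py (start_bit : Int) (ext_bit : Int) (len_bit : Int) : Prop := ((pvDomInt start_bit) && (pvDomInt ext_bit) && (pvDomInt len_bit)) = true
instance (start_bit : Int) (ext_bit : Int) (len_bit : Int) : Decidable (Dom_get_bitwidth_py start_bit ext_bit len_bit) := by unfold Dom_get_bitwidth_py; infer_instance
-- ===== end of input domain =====

-- B replaces A's index-guarded while loop with a closed-form arithmetic split (divmod); same values everywhere.

-- ===== PORT A =====
-- A's while loop for iterations with index ≥ 1 (index 0 is the separate first branch,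
-- peeled off below exactly as A's `if index == 0` distinguishes it).
def gbLoopA (ext_bit : Int) (len_bit : Int) (acc : List Int) : List Int :=
  if len_bit ≤ 0 then acc
  else if ext_bit ≥ 8 then acc ++ [0]
  else if len_bit > 8 - ext_bit then gbLoopA ext_bit (len_bit - (8 - ext_bit)) (acc ++ [8 - ext_bit])
  else acc ++ [len_bit]
termination_by len_bit.toNat
decreasing_by omega

def get_bitwidth_py (start_bit : Int) (ext_bit : Int) (len_bit : Int) : List Int :=
  if len_bit ≤ 0 then []
  else
    let first := if len_bit + start_bit < 8 then len_bit else 8 - start_bit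
    gbLoopA ext_bit (len_bit - first) [first]

-- ===== PORT B =====
def get_bitwidth_py_alt (start_bit : Int) (ext_bit : Int) (len_bit : Int) : List Int :=
  if len_bit ≤ 0 then []
  else
    let first := if len_bit + start_bit < 8 then len_bit else 8 - start_bit
    let remaining := len_bit - first
    if remaining = 0 then [first]
    else if ext_bit ≥ 8 then [first, 0]
    else
      let step := 8 - ext_bit
      let q := PySem.Int.floordiv remaining step
      let r := PySem.Int.mod remaining step
      [first] ++ List.replicate q.toNat step ++ (if r ≠ 0 then [r] else [])

-- ===== PRECONDITION & SPEC =====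
def Spec_get_bitwidth_py (start_bit : Int) (ext_bit : Int) (len_bit : Int) (out : List Int) : Prop := out = get_bitwidth_py_alt start_bit ext_bit len_bit
instance (start_bit : Int) (ext_bit : Int) (len_bit : Int) (out : List Int) : Decidable (Spec_get_bitwidth_py start_bit ext_bit len_bit out) := by unfold Spec_get_bitwidth_py; infer_instance

-- ===== CLAIM (what is proved, stated in full; the proofs are below) =====
def Claim_equal_get_bitwidth_py : Prop := ∀ (start_bit : Int) (ext_bit : Int) (len_bit : Int), Dom_get_bitwidth_py start_bit ext_bit len_bit → Spec_get_bitwidth_py start_bit ext_bit len_bit (get_bitwidth_py start_bit ext_bit len_bit)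

-- ===== LEMMAS AND PROOFS =====

-- Closed form of A's tail loop, for ext_bit < 8 and 0 < rem.
theorem gbLoopA_closed (ext_bit : Int) (rem : Int) (acc : List Int)
    (he : ¬ ext_bit ≥ 8) (hr : 0 < rem) :
    gbLoopA ext_bit rem acc =
      acc ++ List.replicate (PySem.Int.floordiv rem (8 - ext_bit)).toNat (8 - ext_bit)
          ++ (if PySem.Int.mod rem (8 - ext_bit) ≠ 0 then [PySem.Int.mod rem (8 - ext_bit)] else []) := by
  have hstep : (0:Int) < 8 - ext_bit := by omega
  rw [PySem.Int.floordiv_eq_ediv_of_pos hstep, PySem.Int.mod_eq_emod_of_pos hstep]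
  induction hn : rem.toNat using Nat.strong_induction_on generalizing rem acc with
  | _ n ih =>
    rw [gbLoopA, if_neg (by omega : ¬ rem ≤ 0), if_neg he]
    by_cases hgt : rem > 8 - ext_bit
    · rw [if_pos hgt,
        ih (rem - (8 - ext_bit)).toNat (by omega) (rem - (8 - ext_bit)) (acc ++ [8 - ext_bit])
          (by omega) rfl]
      have hd : rem / (8 - ext_bit) = (rem - (8 - ext_bit)) / (8 - ext_bit) + 1 := by
        have h1 := Int.add_mul_ediv_right (rem - (8 - ext_bit)) 1 (by omega : (8 - ext_bit) ≠ 0)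
        rw [show rem - (8 - ext_bit) + 1 * (8 - ext_bit) = rem from by ring] at h1
        exact h1
      have hnn : 0 ≤ (rem - (8 - ext_bit)) / (8 - ext_bit) := Int.ediv_nonneg (by omega) (by omega)
      have hm : rem % (8 - ext_bit) = (rem - (8 - ext_bit)) % (8 - ext_bit) := by
        exact (Int.sub_emod_right rem (8 - ext_bit)).symm
      rw [hd, hm]
      have ht : ((rem - (8 - ext_bit)) / (8 - ext_bit) + 1).toNat
          = ((rem - (8 - ext_bit)) / (8 - ext_bit)).toNat + 1 := by omega
      rw [ht, List.replicate_succ, List.append_assoc]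
      simp
    · rw [if_neg hgt]
      by_cases heq : rem = 8 - ext_bit
      · subst heq
        rw [Int.ediv_self (by omega), Int.emod_self]
        simp
      · have hlt : rem < 8 - ext_bit := by omega
        rw [Int.ediv_eq_zero_of_lt (by omega) hlt, Int.emod_eq_of_lt (by omega) hlt]
        simp [if_pos (by omega : rem ≠ 0)]

-- ===== VERDICT (by name: the statement is the Claim_ definition above) =====
theorem get_bitwidth_py_spec : Claim_equal_get_bitwidth_py := by
  intro start_bit ext_bit len_bit _
  unfold Spec_get_bitwidth_py get_bitwidth_py get_bitwidth_py_alt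
  by_cases hl : len_bit ≤ 0
  · simp [hl]
  · rw [if_neg hl, if_neg hl]
    set first := if len_bit + start_bit < 8 then len_bit else 8 - start_bit with hf
    have hrem : 0 ≤ len_bit - first := by
      rw [hf]; split_ifs with h <;> omega
    by_cases h0 : len_bit - first = 0
    · rw [if_pos h0, gbLoopA, if_pos (by omega)]
    · rw [if_neg h0]
      have hpos : 0 < len_bit - first := by omega
      by_cases he : ext_bit ≥ 8
      · rw [if_pos he, gbLoopA, if_neg (by omega), if_pos he]; rfl
      · rw [if_neg he, gbLoopA_closed ext_bit (len_bit - first) [first] he hpos]
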